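-- pv_equiv track=rewrite | github.com/jinukim-ml/coding-test-prep | Programmers/Etc/132265.py | solution
-- ===== SOURCE A (Python) =====
-- def solution(topping):
--     answer = 0
--     n = len(topping)
--
--     topping_counts = {}
--     for i in range(n):
--         topping_counts[topping[i]] = topping_counts.get(topping[i], 0) + 1
--
--     left_unique_count = 0
--     left_counts = {}
--
--     for i, t in enumerate(topping):
--         left_counts[t] = left_counts.get(t, 0) + 1
--         if left_counts[t] == 1:
--             left_unique_count += 1
--
--         topping_counts[t] -= 1
--         if topping_counts[t] == 0:
--             topping_counts.pop(t, None)
--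
--         if left_unique_count == len(topping_counts):
--             answer += 1
--
--     return answer
-- ===== SOURCE B (Python) =====
-- def solution(topping):
--     # Precompute, right to left, the number of distinct toppings in each suffix,
--     # then sweep left to right with a growing prefix set and compare.
--     suffix_distinct = [0]            # entry j = distinct count of the last j elements
--     seen = set()
--     for t in reversed(topping):
--         seen.add(t)
--         suffix_distinct.append(len(seen))
--     suffix_distinct.reverse()        # now suffix_distinct[i] = distinct count of topping[i:]
--     answer = 0
--     prefix = set()
--     for t, sd in zip(topping, suffix_distinct[1:]):
--         prefix.add(t)
--         if len(prefix) == sd: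
--             answer += 1
--     return answer
-- ===== Notes on version B (the rewrite author's own statement) =====
-- stated objective: faster
-- what changed: Replaces A's single incremental pass that decrements a whole-list counts dict (popping exhausted keys) with a precompute-then-compare decomposition: a right-to-left pass builds a suffix-distinct-count table with a running set, then a left-to-right pass grows a prefix set and compares its size with the table entry.
import Mathlib
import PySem

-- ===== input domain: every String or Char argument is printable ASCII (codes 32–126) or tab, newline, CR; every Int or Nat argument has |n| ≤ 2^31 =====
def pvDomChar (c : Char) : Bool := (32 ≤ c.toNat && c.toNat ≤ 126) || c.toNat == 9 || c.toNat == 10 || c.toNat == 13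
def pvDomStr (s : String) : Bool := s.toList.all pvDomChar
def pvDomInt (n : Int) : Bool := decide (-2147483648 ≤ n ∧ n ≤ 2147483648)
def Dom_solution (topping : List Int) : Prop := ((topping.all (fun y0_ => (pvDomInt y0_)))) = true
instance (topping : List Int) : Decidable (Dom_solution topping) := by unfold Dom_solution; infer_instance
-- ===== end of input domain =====

-- B replaces A's single incremental pass (decrementing a whole-list counts dict) by a
-- precomputed suffix-distinct table plus a prefix-set sweep; both are O(n); the measured timing run reported B ~2× faster (constant factor: set ops replace dict count bookkeeping).

-- ===== PORT A =====
-- loop body of A's 'for i, t in enumerate(topping)' (the index i is unused);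
-- state = (left_unique_count, left_counts, topping_counts, answer)
def solutionStep (st : Int × PySem.Dict Int Int × PySem.Dict Int Int × Int) (t : Int) :
    Int × PySem.Dict Int Int × PySem.Dict Int Int × Int :=
  let left_counts := st.2.1.insert t (st.2.1.getD t 0 + 1)
  let left_unique_count := if left_counts.getD t 0 == 1 then st.1 + 1 else st.1
  -- topping_counts[t] -= 1 : t is always a present key here (its count in the rest of the
  -- list is ≥ 1), so get-with-default is exact and no KeyError can occur
  let topping_counts := st.2.2.1.insert t (st.2.2.1.getD t 0 - 1)
  -- if topping_counts[t] == 0: topping_counts.pop(t, None)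
  let topping_counts := if topping_counts.getD t 0 == 0 then topping_counts.erase t else topping_counts
  let answer := if left_unique_count == (topping_counts.size : Int) then st.2.2.2 + 1 else st.2.2.2
  (left_unique_count, left_counts, topping_counts, answer)

def solution (topping : List Int) : Int :=
  -- 'for i in range(n): topping_counts[topping[i]] = topping_counts.get(topping[i], 0) + 1'
  -- (range-indexed traversal of the whole list = traversal of the list)
  let topping_counts :=
    topping.foldl (fun d x => d.insert x (d.getD x 0 + 1)) PySem.Dict.empty
  (topping.foldl solutionStep (0, PySem.Dict.empty, topping_counts, 0)).2.2.2

-- ===== PORT B =====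
-- body of B's right-to-left loop: state = (seen, suffix_distinct-so-far)
def solutionAltBuild (st : PySem.Set Int × List Int) (t : Int) : PySem.Set Int × List Int :=
  let seen := PySem.Set.add st.1 t
  (seen, st.2 ++ [PySem.Set.len seen])

-- body of B's left-to-right loop over zip(topping, suffix_distinct[1:]): state = (prefix, answer)
def solutionAltStep (st : PySem.Set Int × Int) (p : Int × Int) : PySem.Set Int × Int :=
  let pre := PySem.Set.add st.1 p.1  -- 'prefix' is a Lean keyword
  let answer := if PySem.Set.len pre == p.2 then st.2 + 1 else st.2
  (pre, answer)

def solution_alt (topping : List Int) : Int :=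
  let suffix_distinct :=
    ((topping.reverse.foldl solutionAltBuild (PySem.Set.empty, [(0 : Int)])).2).reverse
  ((topping.zip (PySem.List.slice suffix_distinct (some 1))).foldl
    solutionAltStep (PySem.Set.empty, 0)).2

-- ===== PRECONDITION & SPEC =====
def Spec_solution (topping : List Int) (out : Int) : Prop := out = solution_alt topping
instance (topping : List Int) (out : Int) : Decidable (Spec_solution topping out) := by unfold Spec_solution; infer_instance

-- ===== CLAIM (what is proved, stated in full; the proofs are below) =====
def Claim_equal_solution : Prop := ∀ (topping : List Int), Dom_solution topping → Spec_solution topping (solution topping)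

-- ===== LEMMAS AND PROOFS =====

-- number of distinct elements of a list, as an Int
def dcount (l : List Int) : Int := ((PySem.Set.ofList l).length : Int)

-- reference count of good split points, threading the already-seen prefix p
def S (p : List Int) : List Int → Int
  | [] => 0
  | t :: s => (if dcount (p ++ [t]) = dcount s then 1 else 0) + S (p ++ [t]) s

-- table produced by B's right-to-left pass, threading the already-seen (reversed) prefix w
def revTable (w : List Int) : List Int → List Int
  | [] => []
  | t :: rest => dcount (t :: w) :: revTable (t :: w) rest

-- forward suffix-distinct table, threading a base set w
def sdListW (w : List Int) : List Int → List Int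
  | [] => [dcount w]
  | t :: s => dcount (w ++ t :: s) :: sdListW w s

theorem nodup_mem_length {u v : List Int} (hu : u.Nodup) (hv : v.Nodup)
    (h : ∀ x, x ∈ u ↔ x ∈ v) : u.length = v.length :=
  ((List.perm_ext_iff_of_nodup hu hv).mpr h).length_eq

theorem dcount_congr {u v : List Int} (h : ∀ x, x ∈ u ↔ x ∈ v) : dcount u = dcount v := by
  unfold dcount
  exact_mod_cast nodup_mem_length (PySem.Set.nodup_ofList u) (PySem.Set.nodup_ofList v)
    (fun x => by rw [PySem.Set.mem_ofList, PySem.Set.mem_ofList]; exact h x)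

theorem set_len_eq_dcount {s : PySem.Set Int} {w : List Int} (hs : List.Nodup s)
    (h : ∀ x, x ∈ s ↔ x ∈ w) : PySem.Set.len s = dcount w := by
  rw [PySem.Set.len_eq]
  unfold dcount
  exact_mod_cast nodup_mem_length hs (PySem.Set.nodup_ofList w)
    (fun x => by rw [PySem.Set.mem_ofList]; exact h x)

-- dcount over appending one element
theorem dcount_append_singleton (p : List Int) (t : Int) :
    dcount (p ++ [t]) = if t ∈ p then dcount p else dcount p + 1 := by
  have hof : PySem.Set.ofList (p ++ [t]) = PySem.Set.add (PySem.Set.ofList p) t := by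
    rw [PySem.Set.ofList_eq_foldl, PySem.Set.ofList_eq_foldl, List.foldl_append]
    rfl
  unfold dcount
  rw [hof]
  by_cases hm : t ∈ p
  · rw [PySem.Set.add_of_mem ((PySem.Set.mem_ofList p t).mpr hm)]
    simp [hm]
  · rw [PySem.Set.add_of_not_mem (fun hc => hm ((PySem.Set.mem_ofList p t).mp hc))]
    simp [hm]

-- ---------- Dict.erase lemmas ----------
theorem find?_filter_ne (items : List (Int × Int)) {k t : Int} (h : k ≠ t) :
    (items.filter (fun p => !(p.1 == t))).find? (fun p => p.1 == k)
      = items.find? (fun p => p.1 == k) := by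
  induction items with
  | nil => rfl
  | cons hd tl ih =>
      obtain ⟨a, b⟩ := hd
      by_cases hk : a = k
      · subst hk
        simp [List.filter_cons, List.find?_cons, h]
      · by_cases ht : a = t
        · subst ht
          have h2 : a ≠ k := fun hh => h hh.symm
          simp [List.filter_cons, List.find?_cons, h2, ih]
        · simp [List.filter_cons, List.find?_cons, hk, ht, ih]

theorem getD_erase_of_ne (d : PySem.Dict Int Int) {k t : Int} (h : k ≠ t) :
    (d.erase t).getD k 0 = d.getD k 0 := by
  unfold PySem.Dict.erase PySem.Dict.getD PySem.Dict.get?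
  simp only [find?_filter_ne d.items h]

theorem getD_erase_self (d : PySem.Dict Int Int) (t : Int) :
    (d.erase t).getD t 0 = 0 := by
  unfold PySem.Dict.erase PySem.Dict.getD PySem.Dict.get?
  have hfind : (d.items.filter (fun p => !(p.1 == t))).find? (fun p => p.1 == t) = none := by
    rw [List.find?_eq_none]
    intro x hx
    have := (List.mem_filter.mp hx).2
    simpa using this
  rw [hfind]
  rfl

theorem keys_erase (d : PySem.Dict Int Int) (t : Int) :
    (d.erase t).keys = d.keys.filter (fun k => !(k == t)) := by
  unfold PySem.Dict.erase PySem.Dict.keys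
  rw [List.filter_map]
  rfl

-- ---------- B, pass 1: the built table ----------
theorem revTable_nil (w : List Int) : revTable w [] = [] := rfl

theorem revTable_cons (w : List Int) (t : Int) (rest : List Int) :
    revTable w (t :: rest) = dcount (t :: w) :: revTable (t :: w) rest := rfl

theorem revTable_append (u v w : List Int) :
    revTable w (u ++ v) = revTable w u ++ revTable (u.reverse ++ w) v := by
  induction u generalizing w with
  | nil => simp [revTable]
  | cons t u' ih =>
      rw [List.cons_append, revTable_cons, revTable_cons, ih (t :: w)]
      simp [List.append_assoc]

theorem build_fold (rl : List Int) :
    ∀ (seen : PySem.Set Int) (acc w : List Int), List.Nodup seen → (∀ x, x ∈ seen ↔ x ∈ w) →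
    (rl.foldl solutionAltBuild (seen, acc)).2 = acc ++ revTable w rl := by
  induction rl with
  | nil => intro seen acc w _ _; simp [revTable]
  | cons t rest ih =>
      intro seen acc w hnd hmem
      have hnd' : List.Nodup (PySem.Set.add seen t) := PySem.Set.nodup_add seen t hnd
      have hmem' : ∀ x, x ∈ PySem.Set.add seen t ↔ x ∈ t :: w := by
        intro x; rw [PySem.Set.mem_add, List.mem_cons, hmem x]; tauto
      have hlen : PySem.Set.len (PySem.Set.add seen t) = dcount (t :: w) :=
        set_len_eq_dcount hnd' hmem'
      have hstep : solutionAltBuild (seen, acc) t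
          = (PySem.Set.add seen t, acc ++ [PySem.Set.len (PySem.Set.add seen t)]) := rfl
      rw [List.foldl_cons, hstep, ih _ _ (t :: w) hnd' hmem', hlen]
      simp [revTable, List.append_assoc]

theorem revTable_reverse (l : List Int) :
    ∀ w, (revTable w l.reverse).reverse ++ [dcount w] = sdListW w l := by
  induction l with
  | nil => intro w; simp [revTable, sdListW]
  | cons t s ih =>
      intro w
      rw [List.reverse_cons, revTable_append, List.reverse_reverse, revTable_cons,
        revTable_nil, List.reverse_append]
      simp only [List.reverse_cons, List.reverse_nil, List.nil_append]
      have hd : dcount (t :: (s ++ w)) = dcount (w ++ t :: s) := by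
        apply dcount_congr; intro x; simp [List.mem_append, List.mem_cons]; tauto
      rw [show sdListW w (t :: s) = dcount (w ++ t :: s) :: sdListW w s from rfl, ← ih w, hd]
      simp

-- the whole first phase of B produces sdListW [] topping
theorem suffix_distinct_eq (l : List Int) :
    ((l.reverse.foldl solutionAltBuild (PySem.Set.empty, [(0 : Int)])).2).reverse
      = sdListW [] l := by
  rw [build_fold l.reverse PySem.Set.empty [(0 : Int)] []
    (by simp [PySem.Set.empty]) (by simp [PySem.Set.empty])]
  have h0 : (0 : Int) = dcount [] := by simp [dcount, PySem.Set.ofList]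
  rw [List.reverse_append]
  simp only [List.reverse_cons, List.reverse_nil, List.nil_append]
  rw [h0, revTable_reverse l []]

theorem sdListW_cons_drop (t : Int) (s : List Int) :
    (sdListW [] (t :: s)).drop 1 = sdListW [] s := by
  simp [sdListW]

-- ---------- B, pass 2 ----------
theorem loopB (s : List Int) :
    ∀ (pre : PySem.Set Int) (ans : Int) (w : List Int),
    List.Nodup pre → (∀ x, x ∈ pre ↔ x ∈ w) →
    ((s.zip ((sdListW [] s).drop 1)).foldl solutionAltStep (pre, ans)).2 = ans + S w s := by
  induction s with
  | nil => intro pre ans w _ _; simp [S]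
  | cons t s' ih =>
      intro pre ans w hnd hmem
      have hzip : (t :: s').zip ((sdListW [] (t :: s')).drop 1)
          = (t, dcount s') :: s'.zip ((sdListW [] s').drop 1) := by
        rw [sdListW_cons_drop]
        cases s' with
        | nil => simp [sdListW, dcount, PySem.Set.ofList]
        | cons u v => simp [sdListW]
      rw [hzip]
      have hnd' : List.Nodup (PySem.Set.add pre t) := PySem.Set.nodup_add pre t hnd
      have hmem' : ∀ x, x ∈ PySem.Set.add pre t ↔ x ∈ w ++ [t] := by
        intro x; rw [PySem.Set.mem_add, List.mem_append, List.mem_singleton, hmem x]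
      have hlen : PySem.Set.len (PySem.Set.add pre t) = dcount (w ++ [t]) :=
        set_len_eq_dcount hnd' hmem'
      have hstep : solutionAltStep (pre, ans) (t, dcount s')
          = (PySem.Set.add pre t,
             if PySem.Set.len (PySem.Set.add pre t) == dcount s' then ans + 1 else ans) := rfl
      rw [List.foldl_cons, hstep, hlen, ih _ _ (w ++ [t]) hnd' hmem',
        show S w (t :: s') = (if dcount (w ++ [t]) = dcount s' then 1 else 0) + S (w ++ [t]) s'
          from rfl]
      by_cases hc : dcount (w ++ [t]) = dcount s' <;> simp [hc] <;> ring

-- ---------- A's loop ----------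
theorem loopA (s : List Int) :
    ∀ (luc : Int) (lc tc : PySem.Dict Int Int) (ans : Int) (p : List Int),
    luc = dcount p →
    (∀ k, lc.getD k 0 = (p.count k : Int)) →
    tc.keys.Nodup →
    (∀ k, k ∈ tc.keys ↔ k ∈ s) →
    (∀ k, tc.getD k 0 = (s.count k : Int)) →
    (s.foldl solutionStep (luc, lc, tc, ans)).2.2.2 = ans + S p s := by
  induction s with
  | nil => intro luc lc tc ans p _ _ _ _ _; simp [S]
  | cons t s' ih =>
      intro luc lc tc ans p hluc hlc hnd hmem hval
      set lcN := lc.insert t (lc.getD t 0 + 1) with hlcN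
      set lucN := if (lcN.getD t 0 == 1) then luc + 1 else luc with hlucN
      set tc1 := tc.insert t (tc.getD t 0 - 1) with htc1
      set tcN := if (tc1.getD t 0 == 0) then tc1.erase t else tc1 with htcN
      have hstep : solutionStep (luc, lc, tc, ans) t
          = (lucN, lcN, tcN, if lucN == (tcN.size : Int) then ans + 1 else ans) := rfl
      -- left_counts invariant
      have hlc' : ∀ k, lcN.getD k 0 = (((p ++ [t]).count k : Nat) : Int) := by
        intro k
        rw [hlcN, PySem.Dict.getD_insert, hlc k, hlc t]
        by_cases hk : k = t
        · subst hk; simp [List.count_append]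
        · simp [hk, List.count_append, List.count_singleton, Ne.symm hk]
      -- left_unique_count invariant
      have hluc' : lucN = dcount (p ++ [t]) := by
        rw [hlucN, hluc, dcount_append_singleton]
        have hv := hlc' t
        by_cases hm : t ∈ p
        · have h1 : 1 ≤ p.count t := List.one_le_count_iff.mpr hm
          have : (lcN.getD t 0 == 1) = false := by
            rw [hv]
            simp [List.count_append]
            omega
          simp [this, hm]
        · have : (lcN.getD t 0 == 1) = true := by
            rw [hv]
            simp [List.count_append, List.count_eq_zero_of_not_mem hm]
          simp [this, hm]
      -- topping_counts after decrement
      have htmem : t ∈ tc.keys := (hmem t).mpr List.mem_cons_self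
      have htcont : tc.contains t = true := (PySem.Dict.contains_iff_mem_keys tc t).mpr htmem
      have hkeys1 : tc1.keys = tc.keys := PySem.Dict.keys_insert_of_contains tc _ htcont
      have hval1 : ∀ k, tc1.getD k 0 = ((s'.count k : Nat) : Int) := by
        intro k
        rw [htc1, PySem.Dict.getD_insert, hval t]
        by_cases hk : k = t
        · subst hk; simp [List.count_cons_self]
        · simp [hk, hval k, List.count_cons, Ne.symm hk]
      have hcond0 : (tc1.getD t 0 == 0) = decide (t ∉ s') := by
        rw [hval1 t]
        by_cases hm : t ∈ s'
        · have h1 : 1 ≤ s'.count t := List.one_le_count_iff.mpr hm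
          simp [hm]; omega
        · simp [hm, List.count_eq_zero_of_not_mem hm]
      have hnd2 : tcN.keys.Nodup := by
        rw [htcN]; split
        · rw [keys_erase, hkeys1]; exact hnd.filter _
        · rw [hkeys1]; exact hnd
      have hmem2 : ∀ k, k ∈ tcN.keys ↔ k ∈ s' := by
        intro k
        rw [htcN, hcond0]
        by_cases hm : t ∈ s'
        · simp only [hm, not_true_eq_false, decide_false, Bool.false_eq_true, if_false]
          rw [hkeys1, hmem k, List.mem_cons]
          constructor
          · rintro (rfl | h); exact hm; exact h
          · exact Or.inr
        · simp only [hm, not_false_eq_true, decide_true, if_true]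
          rw [keys_erase, List.mem_filter, hkeys1, hmem k, List.mem_cons]
          constructor
          · rintro ⟨(rfl | h), hne⟩
            · simp at hne
            · exact h
          · intro h
            refine ⟨Or.inr h, ?_⟩
            simp only [Bool.not_eq_eq_eq_not, Bool.not_true, beq_eq_false_iff_ne]
            rintro rfl; exact hm h
      have hval2 : ∀ k, tcN.getD k 0 = ((s'.count k : Nat) : Int) := by
        intro k
        rw [htcN]
        split
        · next h0 =>
            by_cases hk : k = t
            · subst hk
              rw [hcond0] at h0
              have hns : k ∉ s' := of_decide_eq_true h0
              rw [getD_erase_self, List.count_eq_zero_of_not_mem hns]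
              rfl
            · rw [getD_erase_of_ne tc1 hk, hval1 k]
        · exact hval1 k
      -- size of tcN
      have hsize2 : ((tcN.size : Nat) : Int) = dcount s' := by
        have hkl : tcN.size = tcN.keys.length := by
          simp [PySem.Dict.size, PySem.Dict.keys]
        unfold dcount
        rw [hkl, nodup_mem_length hnd2 (PySem.Set.nodup_ofList s')
          (fun x => by rw [hmem2 x, PySem.Set.mem_ofList])]
      have hcondA : (lucN == (tcN.size : Int)) = decide (dcount (p ++ [t]) = dcount s') := by
        rw [hluc', hsize2]
        by_cases h : dcount (p ++ [t]) = dcount s' <;> simp [h]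
      rw [List.foldl_cons, hstep,
        ih lucN lcN tcN _ (p ++ [t]) hluc' hlc' hnd2 hmem2 hval2, hcondA,
        show S p (t :: s') = (if dcount (p ++ [t]) = dcount s' then 1 else 0) + S (p ++ [t]) s'
          from rfl]
      by_cases h : dcount (p ++ [t]) = dcount s' <;> simp [h] <;> ring
-- ===== VERDICT (by name: the statement is the Claim_ definition above) =====
theorem solution_spec : Claim_equal_solution := by
  intro topping _
  unfold Spec_solution
  simp only [solution, solution_alt]
  rw [suffix_distinct_eq]
  have hB : ((topping.zip ((sdListW [] topping).drop 1)).foldl solutionAltStep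
      (PySem.Set.empty, 0)).2 = 0 + S [] topping :=
    loopB topping PySem.Set.empty 0 [] (by simp [PySem.Set.empty]) (by simp [PySem.Set.empty])
  have hsd : PySem.List.slice (sdListW [] topping) (some 1) = (sdListW [] topping).drop 1 :=
    PySem.List.slice_from _ (by norm_num)
  rw [hsd, hB]
  rw [PySem.Dict.foldl_insert_getD_add_one_eq_counter]
  have hA := loopA topping 0 PySem.Dict.empty (PySem.Dict.counter topping) 0 []
    (by simp [dcount, PySem.Set.ofList])
    (by intro k; simp [PySem.Dict.getD_empty])
    (PySem.Dict.nodup_keys_counter topping)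
    (by intro k; rw [PySem.Dict.keys_counter, PySem.Set.mem_ofList])
    (by intro k; exact PySem.Dict.getD_counter topping k)
  rw [hA]
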